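-- pv_equiv track=rewrite | github.com/akarsh1995/talk-sherlock-bot | model_interface/model_interface.py | ids_to_sentence
-- ===== SOURCE A (Python) =====
-- def ids_to_sentence(ids_, w_list):
--     eos_token_index = w_list.index('<EOS>')
--     pad_token_index = w_list.index('<pad>')
--     my_str = ""
--     list_of_responses = []
--     for num_ in ids_:
--         if num_[0] == eos_token_index or num_[0] == pad_token_index:
--             list_of_responses.append(my_str)
--             my_str = ""
--         else:
--             my_str = my_str + w_list[num_[0]] + " "
--     if my_str:
--         list_of_responses.append(my_str)
--     list_of_responses = [i for i in list_of_responses if i]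
--     return list_of_responses
-- ===== SOURCE B (Python) =====
-- def ids_to_sentence(ids_, w_list):
--     eos_token_index = w_list.index('<EOS>')
--     pad_token_index = w_list.index('<pad>')
--
--     def is_delim(num_):
--         return num_[0] == eos_token_index or num_[0] == pad_token_index
--
--     list_of_responses = []
--     i, n = 0, len(ids_)
--     while i < n:
--         if is_delim(ids_[i]):
--             i += 1
--         else:
--             j = i
--             while j < n and not is_delim(ids_[j]):
--                 j += 1
--             list_of_responses.append(''.join(w_list[m[0]] + ' ' for m in ids_[i:j]))
--             i = j
--     return list_of_responses
-- ===== Notes on version B (the rewrite author's own statement) =====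
-- stated objective: alternative
-- what changed: Replaces A's streaming accumulator (append each word to my_str, flush it on every <EOS>/<pad>, then filter out empty segments) with a two-pointer run scan that skips delimiter ids and joins each maximal non-delimiter run directly, so no empty segments are ever produced and no final filter pass is needed.
import Mathlib
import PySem

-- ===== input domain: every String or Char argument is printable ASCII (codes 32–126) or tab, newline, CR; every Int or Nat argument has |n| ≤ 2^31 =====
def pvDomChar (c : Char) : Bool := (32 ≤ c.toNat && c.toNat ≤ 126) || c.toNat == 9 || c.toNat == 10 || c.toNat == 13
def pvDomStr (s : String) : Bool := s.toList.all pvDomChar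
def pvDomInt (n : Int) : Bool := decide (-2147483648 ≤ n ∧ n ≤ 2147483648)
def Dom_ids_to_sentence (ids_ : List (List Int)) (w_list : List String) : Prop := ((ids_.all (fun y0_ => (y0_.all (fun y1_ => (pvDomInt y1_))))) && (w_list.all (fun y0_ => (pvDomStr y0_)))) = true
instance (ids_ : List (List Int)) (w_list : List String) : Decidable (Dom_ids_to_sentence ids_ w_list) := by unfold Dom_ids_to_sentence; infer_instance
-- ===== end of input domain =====

-- B re-implements A's streaming accumulator+flush+filter as a run-based scan (maximal
-- non-delimiter runs joined directly, delimiter runs skipped); alternative decomposition, same cost.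

-- ===== PORT A =====
-- literal port of A: stream words into my_str, flush on <EOS>/<pad>, filter empties.
def ids_to_sentence (ids_ : List (List Int)) (w_list : List String) : List String :=
  match PySem.List.index? w_list "<EOS>", PySem.List.index? w_list "<pad>" with
  | some eosTokenIndex, some padTokenIndex =>
    let fin := ids_.foldl
      (fun (st : String × List String) num_ =>
        if PySem.List.pyGetD num_ 0 0 == (eosTokenIndex : Int)
            || PySem.List.pyGetD num_ 0 0 == (padTokenIndex : Int) then
          ("", st.2 ++ [st.1])
        else
          (st.1 ++ PySem.List.pyGetD w_list (PySem.List.pyGetD num_ 0 0) "" ++ " ", st.2))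
      ("", [])
    let resp := if fin.1 ≠ "" then fin.2 ++ [fin.1] else fin.2
    resp.filter (fun i => i ≠ "")
  | _, _ => []  -- w_list.index raises ValueError in Python; excluded by Pre_

-- ===== PORT B =====
-- B's run scan: skip delimiter ids, take each maximal non-delimiter run, join it.
def altRuns (isDelim : List Int → Bool) (word : List Int → String) : List (List Int) → List String
  | [] => []
  | x :: xs =>
    if isDelim x then altRuns isDelim word xs
    else
      (((x :: xs).takeWhile (fun y => !isDelim y)).map word).foldl (· ++ ·) ""
        :: altRuns isDelim word ((x :: xs).dropWhile (fun y => !isDelim y))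
termination_by l => l.length
decreasing_by
  · simp
  · rename_i h
    rw [List.dropWhile_cons_of_pos (by simp [h])]
    have := List.length_dropWhile_le (fun y => !isDelim y) xs
    simp; omega

def ids_to_sentence_alt (ids_ : List (List Int)) (w_list : List String) : List String :=
  match PySem.List.index? w_list "<EOS>" with
  | none => []  -- w_list.index raises ValueError in Python; excluded by Pre_
  | some eosTokenIndex =>
    match PySem.List.index? w_list "<pad>" with
    | none => []
    | some padTokenIndex =>
      altRuns
        (fun num_ => PySem.List.pyGetD num_ 0 0 == (eosTokenIndex : Int)
                      || PySem.List.pyGetD num_ 0 0 == (padTokenIndex : Int))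
        (fun m => PySem.List.pyGetD w_list (PySem.List.pyGetD m 0 0) "" ++ " ")
        ids_

-- ===== PRECONDITION & SPEC =====
-- Pre_ excludes exactly the inputs where Python A raises: ValueError when '<EOS>' or '<pad>'
-- is missing from w_list, IndexError when some inner list is empty or its first id is out of
-- Python's (wraparound) range for w_list.
def Pre_ids_to_sentence (ids_ : List (List Int)) (w_list : List String) : Prop :=
  "<EOS>" ∈ w_list ∧ "<pad>" ∈ w_list ∧
  ∀ num_ ∈ ids_, num_ ≠ [] ∧
    -(w_list.length : Int) ≤ num_.headD 0 ∧ num_.headD 0 < (w_list.length : Int)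
instance (ids_ : List (List Int)) (w_list : List String) : Decidable (Pre_ids_to_sentence ids_ w_list) := by unfold Pre_ids_to_sentence; infer_instance

def pvWitness_ids_to_sentence : List (List Int) × List String :=
  ([[2], [3], [0], [1], [-1]], ["<EOS>", "<pad>", "hi", "there"])

def Spec_ids_to_sentence (ids_ : List (List Int)) (w_list : List String) (out : List String) : Prop := out = ids_to_sentence_alt ids_ w_list
instance (ids_ : List (List Int)) (w_list : List String) (out : List String) : Decidable (Spec_ids_to_sentence ids_ w_list out) := by unfold Spec_ids_to_sentence; infer_instance

-- ===== CLAIM (what is proved, stated in full; the proofs are below) =====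
def Claim_equal_ids_to_sentence : Prop := ∀ (ids_ : List (List Int)) (w_list : List String), Dom_ids_to_sentence ids_ w_list → Pre_ids_to_sentence ids_ w_list → Spec_ids_to_sentence ids_ w_list (ids_to_sentence ids_ w_list)

-- ===== LEMMAS AND PROOFS =====

theorem str_append_space_ne (s w : String) : s ++ (w ++ " ") ≠ "" := by
  intro h
  have := congrArg String.length h
  simp [String.length_append] at this

theorem str_foldl_append (l : List String) (a : String) :
    l.foldl (· ++ ·) a = a ++ l.foldl (· ++ ·) "" := by
  induction l generalizing a with
  | nil => simp
  | cons x xs ih =>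
    simp only [List.foldl_cons]
    rw [ih (a ++ x), ih ("" ++ x), String.append_assoc]
    simp

theorem str_foldl_cons (a : String) (l : List String) :
    (a :: l).foldl (· ++ ·) "" = a ++ l.foldl (· ++ ·) "" := by
  simp only [List.foldl_cons]
  rw [str_foldl_append]
  simp

-- A's trailing flush followed by the empty filter
def post (fin : String × List String) : List String :=
  (if fin.1 ≠ "" then fin.2 ++ [fin.1] else fin.2).filter (fun i => i ≠ "")

-- A's loop in cons form, with the trailing flush and the empty filter built in.
def fA (delim : List Int → Bool) (f : List Int → String) : List (List Int) → String → List String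
  | [], s => if s = "" then [] else [s]
  | x :: xs, s =>
    if delim x then (if s = "" then fA delim f xs "" else s :: fA delim f xs "")
    else fA delim f xs (s ++ f x)

theorem foldl_to_fA (delim : List Int → Bool) (g : List Int → String) :
    ∀ (ids : List (List Int)) (s : String) (acc : List String),
      post
        (ids.foldl
          (fun (st : String × List String) num_ =>
            if delim num_ then ("", st.2 ++ [st.1]) else (st.1 ++ g num_ ++ " ", st.2))
          (s, acc))
      = acc.filter (fun i => i ≠ "") ++ fA delim (fun x => g x ++ " ") ids s := by
  intro ids
  induction ids with
  | nil =>
    intro s acc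
    by_cases hs : s = "" <;> simp [post, fA, hs, List.filter_append]
  | cons x xs ih =>
    intro s acc
    simp only [List.foldl_cons]
    by_cases hd : delim x = true
    · rw [if_pos hd]
      rw [ih "" (acc ++ [s])]
      by_cases hs : s = "" <;>
        simp [fA, hd, hs, List.filter_append, List.append_assoc]
    · rw [if_neg hd]
      rw [ih (s ++ g x ++ " ") acc]
      simp [fA, hd, String.append_assoc]

theorem altRuns_cons_delim (isDelim : List Int → Bool) (word : List Int → String)
    (x : List Int) (xs : List (List Int)) (h : isDelim x = true) :
    altRuns isDelim word (x :: xs) = altRuns isDelim word xs := by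
  conv_lhs => rw [altRuns]
  simp [h]

theorem altRuns_cons_word (isDelim : List Int → Bool) (word : List Int → String)
    (x : List Int) (xs : List (List Int)) (h : isDelim x = false) :
    altRuns isDelim word (x :: xs)
      = ((x :: xs.takeWhile (fun y => !isDelim y)).map word).foldl (· ++ ·) ""
        :: altRuns isDelim word (xs.dropWhile (fun y => !isDelim y)) := by
  conv_lhs => rw [altRuns]
  simp [h]

-- how a pending my_str is merged into the run decomposition
def absorb (delim : List Int → Bool) (s : String) (ids : List (List Int)) (l : List String) : List String :=
  match ids with
  | x :: _ =>
    if delim x then (if s = "" then l else s :: l)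
    else (s ++ l.headD "") :: l.tail
  | [] => if s = "" then l else s :: l

theorem fA_eq_absorb (delim : List Int → Bool) (g : List Int → String) :
    ∀ (ids : List (List Int)) (s : String),
      fA delim (fun x => g x ++ " ") ids s
        = absorb delim s ids (altRuns delim (fun x => g x ++ " ") ids) := by
  intro ids
  induction ids with
  | nil => intro s; simp [fA, absorb, altRuns]
  | cons x xs ih =>
    intro s
    by_cases hd : delim x = true
    · have hxs : fA delim (fun x => g x ++ " ") xs "" = altRuns delim (fun x => g x ++ " ") xs := by
        rw [ih ""]
        cases xs with
        | nil => simp [absorb, altRuns]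
        | cons y ys =>
          by_cases hy : delim y = true
          · simp [absorb, hy]
          · have hy' : delim y = false := by simpa using hy
            rw [altRuns_cons_word _ _ _ _ hy']
            simp [absorb, hy']
      simp only [fA, hd, if_true, hxs]
      rw [altRuns_cons_delim _ _ _ _ hd]
      simp [absorb, hd]
    · have hd' : delim x = false := by simpa using hd
      simp only [fA, hd', Bool.false_eq_true, if_false]
      rw [ih (s ++ (g x ++ " "))]
      rw [altRuns_cons_word _ _ _ _ hd']
      simp only [absorb, hd', Bool.false_eq_true, if_false]
      cases xs with
      | nil =>
        simp only [List.takeWhile_nil, List.dropWhile_nil, List.map_cons, List.map_nil,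
          str_foldl_cons, List.foldl_nil, altRuns]
        simp [str_append_space_ne s (g x)]
      | cons y ys =>
        by_cases hy : delim y = true
        · rw [List.takeWhile_cons_of_neg (by simp [hy]), List.dropWhile_cons_of_neg (by simp [hy])]
          simp only [hy, if_true, List.map_cons, List.map_nil, str_foldl_cons,
            List.foldl_nil, List.headD_cons, List.tail_cons]
          simp [str_append_space_ne s (g x)]
        · have hy' : delim y = false := by simpa using hy
          rw [List.takeWhile_cons_of_pos (by simp [hy']), List.dropWhile_cons_of_pos (by simp [hy'])]
          simp only [hy', Bool.false_eq_true, if_false]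
          rw [altRuns_cons_word _ _ _ _ hy']
          simp only [List.map_cons, str_foldl_cons, List.headD_cons, List.tail_cons]
          simp [String.append_assoc]

theorem bridge (w_list : List String) (eos pad : Nat) (ids : List (List Int)) :
    post
      (ids.foldl
        (fun (st : String × List String) num_ =>
          if PySem.List.pyGetD num_ 0 0 == (eos : Int)
              || PySem.List.pyGetD num_ 0 0 == (pad : Int) then
            ("", st.2 ++ [st.1])
          else (st.1 ++ PySem.List.pyGetD w_list (PySem.List.pyGetD num_ 0 0) "" ++ " ", st.2))
        ("", []))
    = altRuns
        (fun num_ => PySem.List.pyGetD num_ 0 0 == (eos : Int)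
                      || PySem.List.pyGetD num_ 0 0 == (pad : Int))
        (fun m => PySem.List.pyGetD w_list (PySem.List.pyGetD m 0 0) "" ++ " ")
        ids := by
  rw [foldl_to_fA
      (fun num_ => PySem.List.pyGetD num_ 0 0 == (eos : Int)
                    || PySem.List.pyGetD num_ 0 0 == (pad : Int))
      (fun m => PySem.List.pyGetD w_list (PySem.List.pyGetD m 0 0) "") ids "" []]
  rw [fA_eq_absorb]
  cases ids with
  | nil => simp [absorb, altRuns]
  | cons x xs =>
    by_cases hx : (PySem.List.pyGetD x 0 0 == (eos : Int) || PySem.List.pyGetD x 0 0 == (pad : Int)) = true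
    · simp [absorb, hx]
    · have hx' := eq_false_of_ne_true hx
      rw [altRuns_cons_word _ _ _ _ hx']
      simp [absorb, hx']

-- ===== VERDICT (by name: the statement is the Claim_ definition above) =====
theorem ids_to_sentence_spec : Claim_equal_ids_to_sentence := by
  intro ids_ w_list _ _
  unfold Spec_ids_to_sentence ids_to_sentence ids_to_sentence_alt
  cases hE : PySem.List.index? w_list "<EOS>" with
  | none => cases hP : PySem.List.index? w_list "<pad>" <;> rfl
  | some eos =>
    cases hP : PySem.List.index? w_list "<pad>" with
    | none => rfl
    | some pad =>
      have h := bridge w_list eos pad ids_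
      unfold post at h
      dsimp only
      exact h
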